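-- pv_equiv track=rewrite | github.com/NNLong1208/license_plate_recognition_yolov5 | modules/modules.py | sort_plate
-- ===== SOURCE A (Python) =====
-- def get_ele_0(l):
--     return l[0]
--
-- def sort_plate(pre):
--     plate = [[],[]]
--     for i in pre:
--         if i[1] < 220:
--             plate[0].append(i)
--         else:
--             plate[1].append(i)
--
--     plate[0] = sorted(plate[0], key=get_ele_0)
--     plate[1] = sorted(plate[1], key=get_ele_0)
--     return plate
-- ===== SOURCE B (Python) =====
-- def get_ele_0(l):
--     return l[0]
--
-- def sort_plate(pre):
--     order = sorted(pre, key=get_ele_0)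
--     return [[i for i in order if i[1] < 220],
--             [i for i in order if i[1] >= 220]]
-- ===== Notes on version B (the rewrite author's own statement) =====
-- stated objective: idiomatic
-- what changed: B sorts the whole input once (stably by the first element) and then builds each group by a filtering comprehension over the sorted list, instead of A's imperative partition loop followed by two separate per-group sorts; stability makes the group orders identical.
import Mathlib
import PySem

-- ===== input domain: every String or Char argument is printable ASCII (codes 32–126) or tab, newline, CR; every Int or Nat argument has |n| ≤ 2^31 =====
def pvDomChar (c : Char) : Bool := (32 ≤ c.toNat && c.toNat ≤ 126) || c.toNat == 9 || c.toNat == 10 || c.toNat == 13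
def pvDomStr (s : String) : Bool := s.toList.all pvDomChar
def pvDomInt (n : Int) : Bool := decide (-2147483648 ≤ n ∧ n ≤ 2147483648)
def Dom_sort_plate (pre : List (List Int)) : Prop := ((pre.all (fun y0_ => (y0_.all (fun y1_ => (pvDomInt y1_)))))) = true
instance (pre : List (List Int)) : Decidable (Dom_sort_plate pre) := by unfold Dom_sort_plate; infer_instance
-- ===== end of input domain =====

-- B replaces A's "partition loop, then sort each group" by "one stable global sort, then
-- two filtering comprehensions" (objective: idiomatic, same cost).

-- ===== PORT A =====
-- l[0]; the .getD 0 default is never used on Pre_ (every sublist is nonempty there;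
-- outside Pre_ Python raises IndexError).
def get_ele_0 (l : List Int) : Int := (PySem.List.pyGet? l 0).getD 0

-- i[1]; exact under Pre_ (length ≥ 2), where Python's i[1] succeeds.
def pvEle1 (l : List Int) : Int := (PySem.List.pyGet? l 1).getD 0

def sort_plate (pre : List (List Int)) : List (List (List Int)) :=
  -- plate = [[],[]]; for i in pre: append to plate[0] or plate[1]
  let plate := pre.foldl
    (fun pl i => ((if pvEle1 i < 220 then pl.1 ++ [i] else pl.1),
                  (if pvEle1 i < 220 then pl.2 else pl.2 ++ [i]))) ([], [])
  -- plate[0] = sorted(plate[0], key=get_ele_0); plate[1] = sorted(plate[1], key=get_ele_0)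
  [PySem.List.sorted plate.1 get_ele_0 false, PySem.List.sorted plate.2 get_ele_0 false]

-- ===== PORT B =====
def sort_plate_alt (pre : List (List Int)) : List (List (List Int)) :=
  -- order = sorted(pre, key=get_ele_0)
  let order := PySem.List.sorted pre get_ele_0 false
  -- [[i for i in order if i[1] < 220], [i for i in order if i[1] >= 220]]
  [order.filter (fun i => decide (pvEle1 i < 220)),
   order.filter (fun i => decide (pvEle1 i ≥ 220))]

-- ===== PRECONDITION & SPEC =====
-- Pre_ excludes exactly the inputs where Python raises IndexError: a sublist with fewer
-- than two elements (i[1] in the loop / comprehension, l[0] in the sort key).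
def Pre_sort_plate (pre : List (List Int)) : Prop := ∀ l ∈ pre, 2 ≤ l.length
instance (pre : List (List Int)) : Decidable (Pre_sort_plate pre) := by unfold Pre_sort_plate; infer_instance

def pvWitness_sort_plate : List (List Int) := [[3, 250], [1, 10], [2, 219]]

def Spec_sort_plate (pre : List (List Int)) (out : List (List (List Int))) : Prop := out = sort_plate_alt pre
instance (pre : List (List Int)) (out : List (List (List Int))) : Decidable (Spec_sort_plate pre out) := by unfold Spec_sort_plate; infer_instance

-- ===== CLAIM (what is proved, stated in full; the proofs are below) =====
def Claim_equal_sort_plate : Prop := ∀ (pre : List (List Int)), Dom_sort_plate pre → Pre_sort_plate pre → Spec_sort_plate pre (sort_plate pre)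

-- ===== LEMMAS AND PROOFS =====

-- Inserting x when its key is strictly below every key in l puts it in front.
theorem pv_insertBy_all_lt {α : Type} (key : α → Int) (x : α) (l : List α)
    (h : ∀ z ∈ l, key x < key z) :
    PySem.List.insertBy (fun a b => decide (key a < key b)) x l = x :: l := by
  cases l with
  | nil => rfl
  | cons y ys =>
      simp [PySem.List.insertBy, h y (List.mem_cons_self)]

-- filter commutes with insertion into a key-sorted accumulator (stability core).
theorem pv_filter_insertBy {α : Type} (p : α → Bool) (key : α → Int) (x : α) :
    ∀ (acc : List α), acc.Pairwise (fun a b => key a ≤ key b) →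
    (PySem.List.insertBy (fun a b => decide (key a < key b)) x acc).filter p =
      if p x then PySem.List.insertBy (fun a b => decide (key a < key b)) x (acc.filter p)
      else acc.filter p := by
  intro acc
  induction acc with
  | nil => intro _; split_ifs with h <;> simp [PySem.List.insertBy, h]
  | cons y ys ih =>
      intro hp
      rw [List.pairwise_cons] at hp
      by_cases hxy : key x < key y
      · have hfront : ∀ z ∈ (y :: ys).filter p, key x < key z := by
          intro z hz
          have hz' := List.mem_of_mem_filter hz
          rcases List.mem_cons.mp hz' with rfl | hz''
          · exact hxy
          · exact lt_of_lt_of_le hxy (hp.1 z hz'')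
        simp only [PySem.List.insertBy, hxy, decide_true, if_true]
        rw [pv_insertBy_all_lt key x _ hfront]
        by_cases hpx : p x <;> simp [List.filter_cons, hpx]
      · simp only [PySem.List.insertBy, hxy, decide_false]
        simp only [Bool.false_eq_true, if_false]
        by_cases hpy : p y
        · rw [List.filter_cons_of_pos hpy, List.filter_cons_of_pos hpy,
              ih hp.2]
          by_cases hpx : p x
          · simp only [hpx, if_true]
            rw [show PySem.List.insertBy (fun a b => decide (key a < key b)) x
                  (y :: List.filter p ys)
                = y :: PySem.List.insertBy (fun a b => decide (key a < key b)) x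
                    (List.filter p ys) by
              simp [PySem.List.insertBy, hxy]]
          · simp [hpx]
        · rw [List.filter_cons_of_neg hpy, List.filter_cons_of_neg hpy, ih hp.2]

-- filter commutes with the stable sort.
theorem pv_filter_sorted {α : Type} (p : α → Bool) (key : α → Int) (xs : List α) :
    (PySem.List.sorted xs key false).filter p =
      PySem.List.sorted (xs.filter p) key false := by
  induction xs using List.reverseRecOn with
  | nil => rfl
  | append_singleton xs x ih =>
      have hstep : ∀ (l : List α), PySem.List.sorted (l ++ [x]) key false =
          PySem.List.insertBy (fun a b => decide (key a < key b)) x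
            (PySem.List.sorted l key false) := by
        intro l
        rw [PySem.List.sorted_eq_foldl_insertBy, PySem.List.sorted_eq_foldl_insertBy,
            List.foldl_append, List.foldl_cons, List.foldl_nil]
      rw [hstep, pv_filter_insertBy p key x _ (PySem.List.sorted_pairwise xs key)]
      by_cases hpx : p x
      · rw [List.filter_append, List.filter_cons_of_pos hpx, List.filter_nil,
            hstep, ih]
        simp [hpx]
      · rw [List.filter_append, List.filter_cons_of_neg hpx, List.filter_nil,
            List.append_nil, ih]
        simp [hpx]

-- A's partition loop computes the two filters of the input.
theorem pv_partition_foldl (l : List (List Int)) :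
    l.foldl (fun pl i => ((if pvEle1 i < 220 then pl.1 ++ [i] else pl.1),
                          (if pvEle1 i < 220 then pl.2 else pl.2 ++ [i])))
      (([] : List (List Int)), ([] : List (List Int)))
    = (l.filter (fun i => decide (pvEle1 i < 220)),
       l.filter (fun i => decide (pvEle1 i ≥ 220))) := by
  rw [PySem.List.foldl_prod_mk
        (fun acc i => if pvEle1 i < 220 then acc ++ [i] else acc)
        (fun acc i => if pvEle1 i < 220 then acc else acc ++ [i]) l [] []]
  refine Prod.ext ?_ ?_
  · rw [show (fun (acc : List (List Int)) i => if pvEle1 i < 220 then acc ++ [i] else acc)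
        = (fun acc i => if (fun i => decide (pvEle1 i < 220)) i = true then acc ++ [id i] else acc) by
      funext acc i; by_cases h : pvEle1 i < 220 <;> simp [h]]
    rw [PySem.List.foldl_append_if]
    simp
  · rw [show (fun (acc : List (List Int)) i => if pvEle1 i < 220 then acc else acc ++ [i])
        = (fun acc i => if (fun i => decide (pvEle1 i ≥ 220)) i = true then acc ++ [id i] else acc) by
      funext acc i; by_cases h : pvEle1 i < 220 <;> simp [h]]
    rw [PySem.List.foldl_append_if]
    simp

-- ===== VERDICT (by name: the statement is the Claim_ definition above) =====
theorem sort_plate_spec : Claim_equal_sort_plate := by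
  intro pre _ _
  show sort_plate pre = sort_plate_alt pre
  unfold sort_plate sort_plate_alt
  rw [pv_partition_foldl]
  simp only
  rw [pv_filter_sorted (fun i => decide (pvEle1 i < 220)) get_ele_0 pre,
      pv_filter_sorted (fun i => decide (pvEle1 i ≥ 220)) get_ele_0 pre]
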